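-- pv_equiv track=rewrite | github.com/pushkarparakh/ascspipeline | src/analyzerEngine.py | buildSlitherSummary
-- ===== SOURCE A (Python) =====
-- def buildSlitherSummary(detectors: list) -> str:
--     """
--     Converts a list of Slither detector dicts into a concise text summary
--     ready for injection into a Groq prompt.
--     """
--     SEVERITY_ORDER = {"High": 0, "Medium": 1, "Low": 2, "Informational": 3, "Optimization": 4}
--     EXCLUDED_CHECKS = {"naming-convention", "solc-version", "pragma"}
--
--     filtered = [
--         d for d in detectors
--         if d.get("check", "") not in EXCLUDED_CHECKS
--     ]
--     filtered.sort(key=lambda d: SEVERITY_ORDER.get(d.get("impact", "Low"), 3))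
--
--     # Cap at 20 findings to stay within token budget
--     filtered = filtered[:20]
--
--     lines = []
--     for item in filtered:
--         check = item.get("check", "unknown")
--         impact = item.get("impact", "Unknown")
--         confidence = item.get("confidence", "Unknown")
--         description = item.get("description", "").strip().replace("\n", " ")[:300]
--         lines.append(
--             f"- [{impact}/{confidence}] {check}: {description}"
--         )
--
--     return "\n".join(lines) if lines else "No significant findings from Slither."
-- ===== SOURCE B (Python) =====
-- def buildSlitherSummary(detectors: list) -> str:
--     """Bucket (counting) sort over the 5 severity levels instead of a comparison sort."""
--     SEVERITY_ORDER = {"High": 0, "Medium": 1, "Low": 2, "Informational": 3, "Optimization": 4}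
--     EXCLUDED_CHECKS = {"naming-convention", "solc-version", "pragma"}
--
--     buckets = [[], [], [], [], []]
--     for d in detectors:
--         if d.get("check", "") in EXCLUDED_CHECKS:
--             continue
--         buckets[SEVERITY_ORDER.get(d.get("impact", "Low"), 3)].append(d)
--
--     top = (buckets[0] + buckets[1] + buckets[2] + buckets[3] + buckets[4])[:20]
--
--     lines = [
--         f"- [{item.get('impact', 'Unknown')}/{item.get('confidence', 'Unknown')}] "
--         f"{item.get('check', 'unknown')}: "
--         f"{item.get('description', '').strip().replace(chr(10), ' ')[:300]}"
--         for item in top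
--     ]
--     return "\n".join(lines) if lines else "No significant findings from Slither."
-- ===== Notes on version B (the rewrite author's own statement) =====
-- stated objective: alternative
-- what changed: Replaces the comparison .sort over the severity key with a single-pass bucket (counting) sort into 5 severity buckets concatenated High->Optimization, and builds the lines by a comprehension over the top-20 slice instead of filter-then-sort-then-loop.
import Mathlib
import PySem

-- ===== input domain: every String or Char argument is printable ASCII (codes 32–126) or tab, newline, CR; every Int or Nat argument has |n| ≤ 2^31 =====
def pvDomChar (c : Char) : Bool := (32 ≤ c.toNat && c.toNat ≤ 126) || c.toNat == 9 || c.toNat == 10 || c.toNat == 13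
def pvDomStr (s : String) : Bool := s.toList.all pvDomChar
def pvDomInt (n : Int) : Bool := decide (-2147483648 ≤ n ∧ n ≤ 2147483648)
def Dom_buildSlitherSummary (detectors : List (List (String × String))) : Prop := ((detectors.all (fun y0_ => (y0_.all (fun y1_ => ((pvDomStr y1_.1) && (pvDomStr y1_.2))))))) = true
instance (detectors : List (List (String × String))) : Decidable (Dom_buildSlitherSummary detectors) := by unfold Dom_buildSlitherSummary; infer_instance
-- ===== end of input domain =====

-- B replaces A's comparison sort with a one-pass bucket sort over the 5 severity levels (alternative decomposition, same result).

-- ===== PORT A =====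
-- d.get(k, dflt) on a detector dict (assoc list, first match)
def pvGetA (d : List (String × String)) (k dflt : String) : String :=
  (PySem.Dict.mk d).getD k dflt

def pvSevOrderA : PySem.Dict String Int :=
  PySem.Dict.ofList [("High", 0), ("Medium", 1), ("Low", 2), ("Informational", 3), ("Optimization", 4)]

def pvExcludedA : PySem.Set String := PySem.Set.ofList ["naming-convention", "solc-version", "pragma"]

-- the sort key: SEVERITY_ORDER.get(d.get("impact", "Low"), 3)
def pvKeyA (d : List (String × String)) : Int := pvSevOrderA.getD (pvGetA d "impact" "Low") 3

-- the body of the for-loop: one formatted line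
def pvLineA (item : List (String × String)) : String :=
  "- [" ++ pvGetA item "impact" "Unknown" ++ "/" ++ pvGetA item "confidence" "Unknown" ++ "] "
    ++ pvGetA item "check" "unknown" ++ ": "
    ++ PySem.Str.slice (PySem.Str.replace (PySem.Str.strip (pvGetA item "description" "")) "\n" " ") none (some 300)

def buildSlitherSummary (detectors : List (List (String × String))) : String :=
  let filtered := detectors.filter (fun d => !(pvExcludedA.contains (pvGetA d "check" "")))
  let sorted := PySem.List.sorted filtered pvKeyA false
  let top := PySem.List.slice sorted none (some 20)
  let lines := top.foldl (fun acc item => acc ++ [pvLineA item]) []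
  if lines.isEmpty then "No significant findings from Slither." else PySem.Str.join "\n" lines

-- ===== PORT B =====
def pvGetB (d : List (String × String)) (k dflt : String) : String :=
  (PySem.Dict.mk d).getD k dflt

def pvSevOrderB : PySem.Dict String Int :=
  PySem.Dict.ofList [("High", 0), ("Medium", 1), ("Low", 2), ("Informational", 3), ("Optimization", 4)]

def pvExcludedB : PySem.Set String := PySem.Set.ofList ["naming-convention", "solc-version", "pragma"]

-- buckets[i].append(d) on the fixed five buckets
def pvAppendB (b : List (List (String × String)) × List (List (String × String)) × List (List (String × String)) × List (List (String × String)) × List (List (String × String)))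
    (i : Int) (d : List (String × String)) :
    List (List (String × String)) × List (List (String × String)) × List (List (String × String)) × List (List (String × String)) × List (List (String × String)) :=
  if i == 0 then (b.1 ++ [d], b.2.1, b.2.2.1, b.2.2.2.1, b.2.2.2.2)
  else if i == 1 then (b.1, b.2.1 ++ [d], b.2.2.1, b.2.2.2.1, b.2.2.2.2)
  else if i == 2 then (b.1, b.2.1, b.2.2.1 ++ [d], b.2.2.2.1, b.2.2.2.2)
  else if i == 3 then (b.1, b.2.1, b.2.2.1, b.2.2.2.1 ++ [d], b.2.2.2.2)
  else (b.1, b.2.1, b.2.2.1, b.2.2.2.1, b.2.2.2.2 ++ [d])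

def pvLineB (item : List (String × String)) : String :=
  "- [" ++ pvGetB item "impact" "Unknown" ++ "/" ++ pvGetB item "confidence" "Unknown" ++ "] "
    ++ pvGetB item "check" "unknown" ++ ": "
    ++ PySem.Str.slice (PySem.Str.replace (PySem.Str.strip (pvGetB item "description" "")) "\n" " ") none (some 300)

def buildSlitherSummary_alt (detectors : List (List (String × String))) : String :=
  let b := detectors.foldl
    (fun b d =>
      if pvExcludedB.contains (pvGetB d "check" "") then b
      else pvAppendB b (pvSevOrderB.getD (pvGetB d "impact" "Low") 3) d)
    ([], [], [], [], [])
  let top := PySem.List.slice (b.1 ++ b.2.1 ++ b.2.2.1 ++ b.2.2.2.1 ++ b.2.2.2.2) none (some 20)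
  let lines := top.map pvLineB
  if lines.isEmpty then "No significant findings from Slither." else PySem.Str.join "\n" lines

-- ===== PRECONDITION & SPEC =====
def Spec_buildSlitherSummary (detectors : List (List (String × String))) (out : String) : Prop := out = buildSlitherSummary_alt detectors
instance (detectors : List (List (String × String))) (out : String) : Decidable (Spec_buildSlitherSummary detectors out) := by unfold Spec_buildSlitherSummary; infer_instance

-- ===== CLAIM (what is proved, stated in full; the proofs are below) =====
def Claim_equal_buildSlitherSummary : Prop := ∀ (detectors : List (List (String × String))), Dom_buildSlitherSummary detectors → Spec_buildSlitherSummary detectors (buildSlitherSummary detectors)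

-- ===== LEMMAS AND PROOFS =====

-- the severity key always lands in one of the five buckets
theorem pvKeyA_range (d : List (String × String)) : 0 ≤ pvKeyA d ∧ pvKeyA d < 5 := by
  unfold pvKeyA
  generalize pvGetA d "impact" "Low" = s
  rcases h : pvSevOrderA.get? s with _ | v
  · rw [PySem.Dict.getD_eq_get?_getD, h]; simp
  · have hmem := PySem.Dict.mem_items_of_get?_eq_some pvSevOrderA h
    have hitems : pvSevOrderA.items =
        [("High", (0:Int)), ("Medium", 1), ("Low", 2), ("Informational", 3), ("Optimization", 4)] := by decide
    rw [hitems] at hmem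
    rw [PySem.Dict.getD_eq_get?_getD, h]
    simp only [List.mem_cons, List.not_mem_nil, or_false, Prod.mk.injEq] at hmem
    rcases hmem with ⟨_, hv⟩ | ⟨_, hv⟩ | ⟨_, hv⟩ | ⟨_, hv⟩ | ⟨_, hv⟩ <;> subst hv <;> simp

theorem insertBy_append_of_false {α : Type} (before : α → α → Bool) (x : α) (A B : List α)
    (hA : ∀ y ∈ A, before x y = false) :
    PySem.List.insertBy before x (A ++ B) = A ++ PySem.List.insertBy before x B := by
  induction A with
  | nil => simp
  | cons a A ih =>
    have ha : before x a = false := hA a (by simp)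
    simp only [List.cons_append, PySem.List.insertBy, ha]
    simp only [Bool.false_eq_true, if_false]
    rw [ih (fun y hy => hA y (by simp [hy]))]

theorem insertBy_cons_of_true {α : Type} (before : α → α → Bool) (x : α) (B : List α)
    (hB : ∀ y ∈ B, before x y = true) :
    PySem.List.insertBy before x B = x :: B := by
  cases B with
  | nil => simp [PySem.List.insertBy]
  | cons y ys => simp [PySem.List.insertBy, hB y (by simp)]

theorem insertBy_middle {α : Type} (before : α → α → Bool) (x : α) (A B : List α)
    (hA : ∀ y ∈ A, before x y = false) (hB : ∀ y ∈ B, before x y = true) :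
    PySem.List.insertBy before x (A ++ B) = A ++ x :: B := by
  rw [insertBy_append_of_false before x A B hA, insertBy_cons_of_true before x B hB]

theorem mem_bucket {α : Type} (key : α → Int) (xs : List α) (k : Int) (y : α)
    (hy : y ∈ xs.filter (fun a => key a == k)) : key y = k :=
  beq_iff_eq.mp (List.mem_filter.mp hy).2

-- the stable sort by a key with values in [0,5) is the concatenation of the five key-buckets
theorem sorted5 {α : Type} (key : α → Int) (h : ∀ a, 0 ≤ key a ∧ key a < 5) (xs : List α) :
    PySem.List.sorted xs key false =
      xs.filter (fun a => key a == 0) ++ xs.filter (fun a => key a == 1) ++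
      xs.filter (fun a => key a == 2) ++ xs.filter (fun a => key a == 3) ++
      xs.filter (fun a => key a == 4) := by
  rw [PySem.List.sorted_eq_foldl_insertBy]
  induction xs using List.reverseRecOn with
  | nil => simp
  | append_singleton xs x ih =>
    rw [List.foldl_append, List.foldl_cons, List.foldl_nil, ih]
    have hx := h x
    have h5 : key x = 0 ∨ key x = 1 ∨ key x = 2 ∨ key x = 3 ∨ key x = 4 := by omega
    simp only [List.filter_append, List.filter_cons, List.filter_nil]
    rcases h5 with hkx | hkx | hkx | hkx | hkx
    · have hmid := insertBy_middle (fun a b => decide (key a < key b)) x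
        (xs.filter (fun a => key a == 0))
        (xs.filter (fun a => key a == 1) ++ xs.filter (fun a => key a == 2) ++
         xs.filter (fun a => key a == 3) ++ xs.filter (fun a => key a == 4))
        (fun y hy => by simp [mem_bucket key xs 0 y hy, hkx])
        (fun y hy => by
          simp only [List.append_assoc, List.mem_append] at hy
          rcases hy with h1 | h2 | h3 | h4
          · simp [mem_bucket key xs 1 y h1, hkx]
          · simp [mem_bucket key xs 2 y h2, hkx]
          · simp [mem_bucket key xs 3 y h3, hkx]
          · simp [mem_bucket key xs 4 y h4, hkx])
      simp only [List.append_assoc] at hmid ⊢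
      rw [hmid]
      simp [hkx]
    · have hmid := insertBy_middle (fun a b => decide (key a < key b)) x
        (xs.filter (fun a => key a == 0) ++ xs.filter (fun a => key a == 1))
        (xs.filter (fun a => key a == 2) ++ xs.filter (fun a => key a == 3) ++
         xs.filter (fun a => key a == 4))
        (fun y hy => by
          simp only [List.mem_append] at hy
          rcases hy with h0 | h1
          · simp [mem_bucket key xs 0 y h0, hkx]
          · simp [mem_bucket key xs 1 y h1, hkx])
        (fun y hy => by
          simp only [List.append_assoc, List.mem_append] at hy
          rcases hy with h2 | h3 | h4
          · simp [mem_bucket key xs 2 y h2, hkx]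
          · simp [mem_bucket key xs 3 y h3, hkx]
          · simp [mem_bucket key xs 4 y h4, hkx])
      simp only [List.append_assoc] at hmid ⊢
      rw [hmid]
      simp [hkx]
    · have hmid := insertBy_middle (fun a b => decide (key a < key b)) x
        (xs.filter (fun a => key a == 0) ++ xs.filter (fun a => key a == 1) ++
         xs.filter (fun a => key a == 2))
        (xs.filter (fun a => key a == 3) ++ xs.filter (fun a => key a == 4))
        (fun y hy => by
          simp only [List.append_assoc, List.mem_append] at hy
          rcases hy with h0 | h1 | h2
          · simp [mem_bucket key xs 0 y h0, hkx]
          · simp [mem_bucket key xs 1 y h1, hkx]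
          · simp [mem_bucket key xs 2 y h2, hkx])
        (fun y hy => by
          simp only [List.mem_append] at hy
          rcases hy with h3 | h4
          · simp [mem_bucket key xs 3 y h3, hkx]
          · simp [mem_bucket key xs 4 y h4, hkx])
      simp only [List.append_assoc] at hmid ⊢
      rw [hmid]
      simp [hkx]
    · have hmid := insertBy_middle (fun a b => decide (key a < key b)) x
        (xs.filter (fun a => key a == 0) ++ xs.filter (fun a => key a == 1) ++
         xs.filter (fun a => key a == 2) ++ xs.filter (fun a => key a == 3))
        (xs.filter (fun a => key a == 4))
        (fun y hy => by
          simp only [List.append_assoc, List.mem_append] at hy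
          rcases hy with h0 | h1 | h2 | h3
          · simp [mem_bucket key xs 0 y h0, hkx]
          · simp [mem_bucket key xs 1 y h1, hkx]
          · simp [mem_bucket key xs 2 y h2, hkx]
          · simp [mem_bucket key xs 3 y h3, hkx])
        (fun y hy => by simp [mem_bucket key xs 4 y hy, hkx])
      simp only [List.append_assoc] at hmid ⊢
      rw [hmid]
      simp [hkx]
    · have hmid := insertBy_middle (fun a b => decide (key a < key b)) x
        (xs.filter (fun a => key a == 0) ++ xs.filter (fun a => key a == 1) ++
         xs.filter (fun a => key a == 2) ++ xs.filter (fun a => key a == 3) ++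
         xs.filter (fun a => key a == 4))
        []
        (fun y hy => by
          simp only [List.append_assoc, List.mem_append] at hy
          rcases hy with h0 | h1 | h2 | h3 | h4
          · simp [mem_bucket key xs 0 y h0, hkx]
          · simp [mem_bucket key xs 1 y h1, hkx]
          · simp [mem_bucket key xs 2 y h2, hkx]
          · simp [mem_bucket key xs 3 y h3, hkx]
          · simp [mem_bucket key xs 4 y h4, hkx])
        (fun y hy => by simp at hy)
      simp only [List.append_nil, List.append_assoc] at hmid ⊢
      rw [hmid]
      simp [hkx]

-- B's bucket loop collects, per severity level, exactly the kept detectors in input order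
theorem bucketsB_inv (xs : List (List (String × String)))
    (b : List (List (String × String)) × List (List (String × String)) × List (List (String × String)) × List (List (String × String)) × List (List (String × String))) :
    xs.foldl
      (fun b d =>
        if pvExcludedB.contains (pvGetB d "check" "") then b
        else pvAppendB b (pvSevOrderB.getD (pvGetB d "impact" "Low") 3) d)
      b =
    (b.1 ++ (xs.filter (fun d => !(pvExcludedB.contains (pvGetB d "check" "")))).filter (fun d => pvKeyA d == 0),
     b.2.1 ++ (xs.filter (fun d => !(pvExcludedB.contains (pvGetB d "check" "")))).filter (fun d => pvKeyA d == 1),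
     b.2.2.1 ++ (xs.filter (fun d => !(pvExcludedB.contains (pvGetB d "check" "")))).filter (fun d => pvKeyA d == 2),
     b.2.2.2.1 ++ (xs.filter (fun d => !(pvExcludedB.contains (pvGetB d "check" "")))).filter (fun d => pvKeyA d == 3),
     b.2.2.2.2 ++ (xs.filter (fun d => !(pvExcludedB.contains (pvGetB d "check" "")))).filter (fun d => pvKeyA d == 4)) := by
  induction xs generalizing b with
  | nil => simp
  | cons x xs ih =>
    rw [List.foldl_cons]
    by_cases hex : pvExcludedB.contains (pvGetB x "check" "") = true
    · rw [if_pos hex, ih]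
      simp at hex
      simp [List.filter_cons, hex, -List.filter_filter]
    · rw [if_neg hex, ih]
      simp at hex
      have hxkey : pvSevOrderB.getD (pvGetB x "impact" "Low") 3 = pvKeyA x := rfl
      have hx := pvKeyA_range x
      have h5 : pvKeyA x = 0 ∨ pvKeyA x = 1 ∨ pvKeyA x = 2 ∨ pvKeyA x = 3 ∨ pvKeyA x = 4 := by omega
      rcases h5 with hkx | hkx | hkx | hkx | hkx <;>
        simp [pvAppendB, hxkey, hkx, List.filter_cons, hex, -List.filter_filter]

-- ===== VERDICT (by name: the statement is the Claim_ definition above) =====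
theorem buildSlitherSummary_spec : Claim_equal_buildSlitherSummary := by
  unfold Claim_equal_buildSlitherSummary
  intro detectors _
  unfold Spec_buildSlitherSummary buildSlitherSummary buildSlitherSummary_alt
  have hget : pvGetB = pvGetA := rfl
  have hline : pvLineB = pvLineA := rfl
  have hex : pvExcludedB = pvExcludedA := rfl
  simp only [bucketsB_inv, sorted5 pvKeyA pvKeyA_range,
    PySem.List.foldl_append_singleton_eq_map]
  simp [hget, hline, hex, List.append_assoc]
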